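-- pv_equiv track=rewrite | github.com/ShaquallLee/PythonAutoTest | myAlgorithms/DP/robot_move.py | robotMove
-- ===== SOURCE A (Python) =====
-- def robotMove(N, E, rest, p):
--     '''
--     discription:递归形式解决机器人运行问题
--     params:
--         N:位置的个数
--         E：终点的位置
--         rest：当前剩余可走的步数
--         p：当前的位置
--     return：
--         从起点走到终点的方式的种数
--     '''
--     if rest == 0:
--         return 1 if p==E else 0
--     if p==1:
--         return robotMove(N, E, rest-1, 2)
--     if p==N:
--         return robotMove(N, E, rest-1, p-1)
--     return robotMove(N, E, rest-1, p+1) + robotMove(N, E, rest-1, p-1)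
-- ===== SOURCE B (Python) =====
-- def robotMove(N, E, rest, p):
--     # Bottom-up DP: layer[q] = number of ways to reach E from q in r steps;
--     # only positions within distance rest-r of p are ever needed.
--     layer = {q: (1 if q == E else 0) for q in range(p - rest, p + rest + 1)}
--     for r in range(1, rest + 1):
--         layer = {q: (layer[q + 1] if q == 1 else
--                      layer[q - 1] if q == N else
--                      layer[q + 1] + layer[q - 1])
--                  for q in range(p - (rest - r), p + (rest - r) + 1)}
--     return layer[p]
-- ===== Notes on version B (the rewrite author's own statement) =====
-- stated objective: alternative
-- what changed: Replaced the exponential branching recursion with a bottom-up dynamic program over layers of positions (a dict per remaining-step count), computing each state once; intended as faster (A timed out at n=16 in a timing run) but a timing run could not confirm the label.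
import Mathlib
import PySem

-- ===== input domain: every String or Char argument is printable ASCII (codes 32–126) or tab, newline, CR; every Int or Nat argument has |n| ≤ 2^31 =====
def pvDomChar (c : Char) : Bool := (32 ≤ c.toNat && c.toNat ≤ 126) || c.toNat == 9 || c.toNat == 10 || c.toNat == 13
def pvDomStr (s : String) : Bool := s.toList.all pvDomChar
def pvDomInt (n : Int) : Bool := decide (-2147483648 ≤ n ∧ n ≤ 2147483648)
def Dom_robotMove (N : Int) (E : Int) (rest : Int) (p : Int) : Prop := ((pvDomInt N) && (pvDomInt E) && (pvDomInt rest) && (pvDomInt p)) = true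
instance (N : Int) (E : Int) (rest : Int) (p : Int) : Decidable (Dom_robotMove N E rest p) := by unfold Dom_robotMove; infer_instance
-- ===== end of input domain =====

-- B replaces A's exponential branching recursion by a bottom-up layer-by-layer DP computing each (steps, position) state once.

-- ===== PORT A =====
-- A's recursion with rest as the (nonnegative, under Pre_) structural fuel.
def robotMoveA (N : Int) (E : Int) : Nat → Int → Int
  | 0, p => if p = E then 1 else 0
  | r + 1, p =>
    if p = 1 then robotMoveA N E r 2
    else if p = N then robotMoveA N E r (p - 1)
    else robotMoveA N E r (p + 1) + robotMoveA N E r (p - 1)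

def robotMove (N : Int) (E : Int) (rest : Int) (p : Int) : Int :=
  robotMoveA N E rest.toNat p

-- ===== PORT B =====
-- one dict-comprehension layer: {q: body(q) for q in range(lo, hi)}
def mkLayer (lo hi : Int) (body : Int → Int) : PySem.Dict Int Int :=
  (PySem.List.pyRange lo hi 1).foldl (fun d q => d.insert q (body q)) PySem.Dict.empty

def robotMove_alt (N : Int) (E : Int) (rest : Int) (p : Int) : Int :=
  let init := mkLayer (p - rest) (p + rest + 1) (fun q => if q = E then 1 else 0)
  let final := (PySem.List.pyRange 1 (rest + 1) 1).foldl
    (fun layer r => mkLayer (p - (rest - r)) (p + (rest - r) + 1)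
      (fun q =>
        if q = 1 then layer.getD (q + 1) 0
        else if q = N then layer.getD (q - 1) 0
        else layer.getD (q + 1) 0 + layer.getD (q - 1) 0))
    init
  final.getD p 0

-- ===== PRECONDITION & SPEC =====
-- Pre_ excludes rest < 0, where Python A recurses forever (RecursionError) and B raises KeyError.
def Pre_robotMove (N : Int) (E : Int) (rest : Int) (p : Int) : Prop := 0 ≤ rest
instance (N : Int) (E : Int) (rest : Int) (p : Int) : Decidable (Pre_robotMove N E rest p) := by unfold Pre_robotMove; infer_instance
def pvWitness_robotMove : Int × Int × Int × Int := (5, 4, 6, 2)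
def Spec_robotMove (N : Int) (E : Int) (rest : Int) (p : Int) (out : Int) : Prop := out = robotMove_alt N E rest p
instance (N : Int) (E : Int) (rest : Int) (p : Int) (out : Int) : Decidable (Spec_robotMove N E rest p out) := by unfold Spec_robotMove; infer_instance

-- ===== CLAIM (what is proved, stated in full; the proofs are below) =====
def Claim_equal_robotMove : Prop := ∀ (N : Int) (E : Int) (rest : Int) (p : Int), Dom_robotMove N E rest p → Pre_robotMove N E rest p → Spec_robotMove N E rest p (robotMove N E rest p)

-- ===== LEMMAS AND PROOFS =====

-- lookup in a comprehension layer at a key inside the range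
theorem mkLayer_getD (lo hi q : Int) (body : Int → Int) (h1 : lo ≤ q) (h2 : q < hi) :
    (mkLayer lo hi body).getD q 0 = body q := by
  have hitems : (mkLayer lo hi body).items
      = (PySem.List.pyRange lo hi 1).map (fun x => (x, body x)) := by
    have := PySem.Dict.items_foldl_insert_fresh (PySem.List.pyRange lo hi 1)
      (fun x => x) body PySem.Dict.empty (by intro a _; simp)
      (by simpa using PySem.List.nodup_pyRange_one lo hi)
    simpa [mkLayer, PySem.Dict.empty] using this
  have hmem : (q, body q) ∈ (mkLayer lo hi body).items := by
    rw [hitems]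
    exact List.mem_map.2 ⟨q, by rw [PySem.List.mem_pyRange_one]; exact ⟨h1, h2⟩, rfl⟩
  exact PySem.Dict.getD_of_mem_items _ hmem
    (PySem.Dict.nodup_keys_foldl_insert _ _ _ (by simp)) 0

-- invariant: after iterations r = 1..k of B's loop, the layer holds robotMoveA at depth k
-- on every position within distance rest-k of p.
theorem loop_inv (N E rest p : Int) (k : Nat) (hk : (k : Int) ≤ rest) :
    ∀ q : Int, p - (rest - k) ≤ q → q < p + (rest - k) + 1 →
      ((PySem.List.pyRange 1 ((k : Int) + 1) 1).foldl
        (fun layer r => mkLayer (p - (rest - r)) (p + (rest - r) + 1)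
          (fun q =>
            if q = 1 then layer.getD (q + 1) 0
            else if q = N then layer.getD (q - 1) 0
            else layer.getD (q + 1) 0 + layer.getD (q - 1) 0))
        (mkLayer (p - rest) (p + rest + 1) (fun q => if q = E then 1 else 0))).getD q 0
      = robotMoveA N E k q := by
  induction k with
  | zero =>
    intro q h1 h2
    rw [PySem.List.pyRange_one_eq_nil (by norm_num)]
    simp only [List.foldl_nil]
    rw [mkLayer_getD _ _ _ _ (by push_cast at h1 ⊢; omega) (by push_cast at h2 ⊢; omega)]
    rfl
  | succ n ih =>
    intro q h1 h2
    have hn : (n : Int) ≤ rest := by push_cast at hk ⊢; omega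
    have hsplit : PySem.List.pyRange 1 ((n : Int) + 1 + 1) 1
        = PySem.List.pyRange 1 ((n : Int) + 1) 1 ++ [(n : Int) + 1] := by
      exact PySem.List.pyRange_one_succ_right (by omega)
    push_cast
    rw [hsplit, List.foldl_append]
    simp only [List.foldl_cons, List.foldl_nil]
    have hw : rest - ((n : Int) + 1) = rest - (n + 1 : Nat) := by push_cast; ring
    rw [mkLayer_getD _ _ _ _ (by push_cast at h1 ⊢; omega) (by push_cast at h2 ⊢; omega)]
    have hq1 : p - (rest - (n : Int)) ≤ q - 1 ∧ q - 1 < p + (rest - (n : Int)) + 1 := by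
      push_cast at h1 h2 ⊢; omega
    have hq2 : p - (rest - (n : Int)) ≤ q + 1 ∧ q + 1 < p + (rest - (n : Int)) + 1 := by
      push_cast at h1 h2 ⊢; omega
    by_cases hp1 : q = 1
    · subst hp1
      rw [if_pos rfl]
      rw [show (1 : Int) + 1 = 2 by norm_num, ih hn 2 (by omega) (by omega)]
      simp [robotMoveA]
    · by_cases hpN : q = N
      · subst hpN
        rw [if_neg hp1, if_pos rfl]
        rw [ih hn (q - 1) hq1.1 hq1.2]
        simp [robotMoveA, hp1]
      · rw [if_neg hp1, if_neg hpN]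
        rw [ih hn (q + 1) hq2.1 hq2.2, ih hn (q - 1) hq1.1 hq1.2]
        simp [robotMoveA, hp1, hpN]

-- ===== VERDICT (by name: the statement is the Claim_ definition above) =====
theorem robotMove_spec : Claim_equal_robotMove := by
  intro N E rest p _ hpre
  unfold Spec_robotMove robotMove robotMove_alt
  have hc : ((rest.toNat : Int)) = rest := Int.toNat_of_nonneg hpre
  have := loop_inv N E rest p rest.toNat (by omega) p (by omega) (by omega)
  rw [hc] at this
  simpa using this.symm
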